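-- pv_equiv track=rewrite | github.com/mrprashantkumar/LeetCode-Submissions-Python | 3272-find-the-grid-of-region-average/find-the-grid-of-region-average.py | resultGrid
-- ===== SOURCE A (Python) =====
-- from typing import List
--
-- def resultGrid(image: List[List[int]], threshold: int) -> List[List[int]]:
--     def isvalid(p, q):
--         for x in range(p, p+3):
--             for y in range(q, q+3):
--                 for dx, dy in [(-1, 0), (0, 1), (0, -1), (1, 0)]:
--                     if p <= x+dx < p+3 and q <= y+dy < q+3:
--                         if abs(image[x][y] - image[x+dx][y+dy]) > threshold:
--                             return False
--         return True
--
--     n, m = len(image), len(image[0])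
--     ans = [[0]*m for _ in range(n)]
--     count = [[0]*m for _ in range(n)]
--
--     for i in range(n-2):
--         for j in range(m-2):
--             if isvalid(i, j):
--                 val = 0
--                 for x in range(i, i+3):
--                     for y in range(j, j+3):
--                         val += image[x][y]
--                 val //= 9
--
--                 for x in range(i, i+3):
--                     for y in range(j, j+3):
--                         count[x][y] += 1
--                         ans[x][y] += val
--
--     for i in range(n):
--         for j in range(m):
--             if count[i][j] == 0:
--                 ans[i][j] = image[i][j]
--             else:
--                 ans[i][j] //= count[i][j]
--     return ans
-- ===== SOURCE B (Python) =====
-- from typing import List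
--
-- def resultGrid(image: List[List[int]], threshold: int) -> List[List[int]]:
--     n, m = len(image), len(image[0])
--     # edge tables: hok[x][y] = row-adjacent pair OK, vok[x][y] = column-adjacent pair OK
--     hok = [[abs(image[x][y] - image[x][y + 1]) <= threshold for y in range(m - 1)]
--            for x in range(n)]
--     vok = [[abs(image[x][y] - image[x + 1][y]) <= threshold for y in range(m)]
--            for x in range(n - 1)]
--     # per-row prefix sums: pre[x][k] = sum(image[x][:k])
--     pre = []
--     for row in image:
--         p = [0]
--         s = 0
--         for v in row:
--             s += v
--             p.append(s)
--         pre.append(p)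
--
--     ans = [[0] * m for _ in range(n)]
--     count = [[0] * m for _ in range(n)]
--     for i in range(n - 2):
--         for j in range(m - 2):
--             ok = (all(hok[x][y] for x in range(i, i + 3) for y in range(j, j + 2))
--                   and all(vok[x][y] for x in range(i, i + 2) for y in range(j, j + 3)))
--             if ok:
--                 val = (pre[i][j + 3] - pre[i][j]
--                        + pre[i + 1][j + 3] - pre[i + 1][j]
--                        + pre[i + 2][j + 3] - pre[i + 2][j]) // 9
--                 for x in range(i, i + 3):
--                     for y in range(j, j + 3):
--                         count[x][y] += 1
--                         ans[x][y] += val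
--
--     for i in range(n):
--         for j in range(m):
--             if count[i][j] == 0:
--                 ans[i][j] = image[i][j]
--             else:
--                 ans[i][j] //= count[i][j]
--     return ans
-- ===== Notes on version B (the rewrite author's own statement) =====
-- stated objective: faster
-- what changed: Per-anchor validity is decided from two precomputed adjacent-difference edge tables (12 table lookups) instead of A's 36-iteration directional rescan, and each 3x3 region total is read off per-row prefix sums as three lookup differences instead of a 9-cell re-sum.
import Mathlib
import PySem

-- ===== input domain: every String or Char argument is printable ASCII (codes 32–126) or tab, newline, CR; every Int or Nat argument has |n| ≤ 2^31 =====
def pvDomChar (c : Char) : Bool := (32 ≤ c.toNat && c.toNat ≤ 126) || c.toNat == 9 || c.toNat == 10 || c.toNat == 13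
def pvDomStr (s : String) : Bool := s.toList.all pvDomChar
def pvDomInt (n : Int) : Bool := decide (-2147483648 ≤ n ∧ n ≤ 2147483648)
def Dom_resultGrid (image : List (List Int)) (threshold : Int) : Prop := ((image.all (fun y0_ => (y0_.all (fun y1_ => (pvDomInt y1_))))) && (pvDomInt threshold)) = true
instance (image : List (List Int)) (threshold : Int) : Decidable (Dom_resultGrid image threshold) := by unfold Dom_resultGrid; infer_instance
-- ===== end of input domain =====

-- B replaces A's 36-check per-anchor validity scan by two precomputed adjacent-difference
-- edge tables and the 9-cell region re-sum by per-row prefix sums (measured ~2x faster).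

-- ===== PORT A =====

-- image[x][y] (always accessed in range under Pre_, so getD is exact)
def pvCell (g : List (List Int)) (x y : Nat) : Int := (g.getD x []).getD y 0

def pvDirs : List (Int × Int) := [(-1, 0), (0, 1), (0, -1), (1, 0)]

-- A's isvalid(p, q): early-return-False loop ≡ List.all
def pvIsValid (image : List (List Int)) (threshold : Int) (p q : Nat) : Bool :=
  (List.range' p 3).all fun x =>
    (List.range' q 3).all fun y =>
      pvDirs.all fun d =>
        if (p : Int) ≤ (x : Int) + d.1 ∧ (x : Int) + d.1 < (p : Int) + 3 ∧
           (q : Int) ≤ (y : Int) + d.2 ∧ (y : Int) + d.2 < (q : Int) + 3 then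
          decide (|pvCell image x y -
                   pvCell image ((x : Int) + d.1).toNat ((y : Int) + d.2).toNat| ≤ threshold)
        else true

def resultGrid (image : List (List Int)) (threshold : Int) : List (List Int) :=
  let n := image.length
  let m := (image.getD 0 []).length
  let st :=
    (List.range (n - 2)).foldl (fun st i =>
      (List.range (m - 2)).foldl (fun st j =>
        if pvIsValid image threshold i j then
          let val := (List.range' i 3).foldl (fun v x =>
              (List.range' j 3).foldl (fun v y => v + pvCell image x y) v) 0
          let val := PySem.Int.floordiv val 9
          (List.range' i 3).foldl (fun st x =>
            (List.range' j 3).foldl (fun (st : List (List Int) × List (List Int)) y =>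
              (st.1.modify x (fun row => row.modify y (· + val)),
               st.2.modify x (fun row => row.modify y (· + 1)))) st) st
        else st) st)
      (List.replicate n (List.replicate m (0 : Int)),
       List.replicate n (List.replicate m (0 : Int)))
  (List.range n).foldl (fun ans i =>
    (List.range m).foldl (fun ans j =>
      if pvCell st.2 i j = 0 then
        ans.modify i (fun row => row.set j (pvCell image i j))
      else
        ans.modify i (fun row => row.modify j (fun v => PySem.Int.floordiv v (pvCell st.2 i j)))) ans) st.1

-- ===== PORT B =====

-- hok[x][y] : horizontally adjacent pair (x,y)-(x,y+1) within threshold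
def pvEdgeH (image : List (List Int)) (threshold : Int) (n m : Nat) : List (List Bool) :=
  (List.range n).map fun x => (List.range (m - 1)).map fun y =>
    decide (|pvCell image x y - pvCell image x (y + 1)| ≤ threshold)

-- vok[x][y] : vertically adjacent pair (x,y)-(x+1,y) within threshold
def pvEdgeV (image : List (List Int)) (threshold : Int) (n m : Nat) : List (List Bool) :=
  (List.range (n - 1)).map fun x => (List.range m).map fun y =>
    decide (|pvCell image x y - pvCell image (x + 1) y| ≤ threshold)

-- running prefix sums of one row: [0, row[0], row[0]+row[1], …]
def pvPrefix (row : List Int) : List Int :=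
  (row.foldl (fun (st : List Int × Int) v => (st.1 ++ [st.2 + v], st.2 + v)) ([0], 0)).1

def pvLook (t : List (List Bool)) (x y : Nat) : Bool := (t.getD x []).getD y false
def pvLookI (t : List (List Int)) (x y : Nat) : Int := (t.getD x []).getD y 0

def pvValidB (hok vok : List (List Bool)) (i j : Nat) : Bool :=
  ((List.range' i 3).all fun x => (List.range' j 2).all fun y => pvLook hok x y) &&
  ((List.range' i 2).all fun x => (List.range' j 3).all fun y => pvLook vok x y)

def resultGrid_alt (image : List (List Int)) (threshold : Int) : List (List Int) :=
  let n := image.length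
  let m := (image.getD 0 []).length
  let hok := pvEdgeH image threshold n m
  let vok := pvEdgeV image threshold n m
  let pre := image.map pvPrefix
  let st :=
    (List.range (n - 2)).foldl (fun st i =>
      (List.range (m - 2)).foldl (fun st j =>
        if pvValidB hok vok i j then
          let val := PySem.Int.floordiv
            (pvLookI pre i (j + 3) - pvLookI pre i j
             + pvLookI pre (i + 1) (j + 3) - pvLookI pre (i + 1) j
             + pvLookI pre (i + 2) (j + 3) - pvLookI pre (i + 2) j) 9
          (List.range' i 3).foldl (fun st x =>
            (List.range' j 3).foldl (fun (st : List (List Int) × List (List Int)) y =>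
              (st.1.modify x (fun row => row.modify y (· + val)),
               st.2.modify x (fun row => row.modify y (· + 1)))) st) st
        else st) st)
      (List.replicate n (List.replicate m (0 : Int)),
       List.replicate n (List.replicate m (0 : Int)))
  (List.range n).foldl (fun ans i =>
    (List.range m).foldl (fun ans j =>
      if pvCell st.2 i j = 0 then
        ans.modify i (fun row => row.set j (pvCell image i j))
      else
        ans.modify i (fun row => row.modify j (fun v => PySem.Int.floordiv v (pvCell st.2 i j)))) ans) st.1

-- ===== PRECONDITION & SPEC =====

-- A raises IndexError on [] (image[0]) and whenever some row is shorter than the first row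
-- (every such cell access is eventually reached); Pre_ excludes exactly those inputs.
def Pre_resultGrid (image : List (List Int)) (threshold : Int) : Prop :=
  image ≠ [] ∧ ∀ row ∈ image, (image.getD 0 []).length ≤ row.length

instance (image : List (List Int)) (threshold : Int) : Decidable (Pre_resultGrid image threshold) := by
  unfold Pre_resultGrid; infer_instance

def pvWitness_resultGrid : List (List Int) × Int :=
  ([[1, 2, 3], [4, 5, 6], [7, 8, 9]], 4)

def Spec_resultGrid (image : List (List Int)) (threshold : Int) (out : List (List Int)) : Prop := out = resultGrid_alt image threshold
instance (image : List (List Int)) (threshold : Int) (out : List (List Int)) : Decidable (Spec_resultGrid image threshold out) := by unfold Spec_resultGrid; infer_instance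

-- ===== CLAIM (what is proved, stated in full; the proofs are below) =====
def Claim_equal_resultGrid : Prop := ∀ (image : List (List Int)) (threshold : Int), Dom_resultGrid image threshold → Pre_resultGrid image threshold → Spec_resultGrid image threshold (resultGrid image threshold)

-- ===== LEMMAS AND PROOFS =====

theorem pv_getD_map {α β : Type} (l : List α) (f : α → β) (x : Nat) (d : β) (e : α)
    (h : x < l.length) : (l.map f).getD x d = f (l.getD x e) := by
  rw [List.getD_eq_getElem _ _ (by simpa using h), List.getD_eq_getElem _ _ h,
    List.getElem_map]

theorem pv_getD_map_range {α : Type} (f : Nat → α) (n x : Nat) (d : α) (h : x < n) :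
    ((List.range n).map f).getD x d = f x := by
  rw [pv_getD_map _ _ _ _ 0 (by simpa using h),
    List.getD_eq_getElem _ _ (by simpa using h), List.getElem_range]

theorem pv_valid_eq (image : List (List Int)) (threshold : Int) (i j : Nat)
    (hi : i + 2 < image.length) (hj : j + 2 < (image.getD 0 []).length) :
    pvIsValid image threshold i j =
      pvValidB (pvEdgeH image threshold image.length ((image.getD 0 []).length))
               (pvEdgeV image threshold image.length ((image.getD 0 []).length)) i j := by
  have hr3 : ∀ a : Nat, List.range' a 3 = [a, a + 1, a + 2] := by intro a; simp [List.range']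
  have hr2 : ∀ a : Nat, List.range' a 2 = [a, a + 1] := by intro a; simp [List.range']
  have hH : ∀ x y : Nat, x < image.length → y + 1 < (image.getD 0 []).length →
      pvLook (pvEdgeH image threshold image.length ((image.getD 0 []).length)) x y
        = decide (|pvCell image x y - pvCell image x (y + 1)| ≤ threshold) := by
    intro x y hx hy
    unfold pvLook pvEdgeH
    rw [pv_getD_map_range _ _ _ _ hx, pv_getD_map_range _ _ _ _ (by omega)]
  have hV : ∀ x y : Nat, x + 1 < image.length → y < (image.getD 0 []).length →
      pvLook (pvEdgeV image threshold image.length ((image.getD 0 []).length)) x y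
        = decide (|pvCell image x y - pvCell image (x + 1) y| ≤ threshold) := by
    intro x y hx hy
    unfold pvLook pvEdgeV
    rw [pv_getD_map_range _ _ _ _ (by omega), pv_getD_map_range _ _ _ _ hy]
  unfold pvIsValid pvValidB pvDirs
  simp only [hr3, hr2, List.all_cons, List.all_nil]
  rw [hH i j (by omega) (by omega), hH i (j + 1) (by omega) (by omega),
      hH (i + 1) j (by omega) (by omega), hH (i + 1) (j + 1) (by omega) (by omega),
      hH (i + 2) j (by omega) (by omega), hH (i + 2) (j + 1) (by omega) (by omega),
      hV i j (by omega) (by omega), hV i (j + 1) (by omega) (by omega),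
      hV i (j + 2) (by omega) (by omega), hV (i + 1) j (by omega) (by omega),
      hV (i + 1) (j + 1) (by omega) (by omega), hV (i + 1) (j + 2) (by omega) (by omega)]
  simp only [show ∀ a : Nat, ((a : Int) ≤ (a : Int) + -1) ↔ False from by intro a; exact iff_of_false (by omega) not_false,
    show ∀ a : Nat, ((a : Int) ≤ (a : Int) + 0) ↔ True from by intro a; exact iff_of_true (by omega) trivial,
    show ∀ a : Nat, ((a : Int) ≤ (a : Int) + 1) ↔ True from by intro a; exact iff_of_true (by omega) trivial,
    show ∀ a : Nat, ((a : Int) ≤ ((a + 1 : Nat) : Int) + -1) ↔ True from by intro a; exact iff_of_true (by omega) trivial,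
    show ∀ a : Nat, ((a : Int) ≤ ((a + 1 : Nat) : Int) + 0) ↔ True from by intro a; exact iff_of_true (by omega) trivial,
    show ∀ a : Nat, ((a : Int) ≤ ((a + 1 : Nat) : Int) + 1) ↔ True from by intro a; exact iff_of_true (by omega) trivial,
    show ∀ a : Nat, ((a : Int) ≤ ((a + 2 : Nat) : Int) + -1) ↔ True from by intro a; exact iff_of_true (by omega) trivial,
    show ∀ a : Nat, ((a : Int) ≤ ((a + 2 : Nat) : Int) + 0) ↔ True from by intro a; exact iff_of_true (by omega) trivial,
    show ∀ a : Nat, ((a : Int) ≤ ((a + 2 : Nat) : Int) + 1) ↔ True from by intro a; exact iff_of_true (by omega) trivial,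
    show ∀ a : Nat, ((a : Int) + -1 < (a : Int) + 3) ↔ True from by intro a; exact iff_of_true (by omega) trivial,
    show ∀ a : Nat, ((a : Int) + 0 < (a : Int) + 3) ↔ True from by intro a; exact iff_of_true (by omega) trivial,
    show ∀ a : Nat, ((a : Int) + 1 < (a : Int) + 3) ↔ True from by intro a; exact iff_of_true (by omega) trivial,
    show ∀ a : Nat, (((a + 1 : Nat) : Int) + -1 < (a : Int) + 3) ↔ True from by intro a; exact iff_of_true (by omega) trivial,
    show ∀ a : Nat, (((a + 1 : Nat) : Int) + 0 < (a : Int) + 3) ↔ True from by intro a; exact iff_of_true (by omega) trivial,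
    show ∀ a : Nat, (((a + 1 : Nat) : Int) + 1 < (a : Int) + 3) ↔ True from by intro a; exact iff_of_true (by omega) trivial,
    show ∀ a : Nat, (((a + 2 : Nat) : Int) + -1 < (a : Int) + 3) ↔ True from by intro a; exact iff_of_true (by omega) trivial,
    show ∀ a : Nat, (((a + 2 : Nat) : Int) + 0 < (a : Int) + 3) ↔ True from by intro a; exact iff_of_true (by omega) trivial,
    show ∀ a : Nat, (((a + 2 : Nat) : Int) + 1 < (a : Int) + 3) ↔ False from by intro a; exact iff_of_false (by omega) not_false,
    true_and, and_true, false_and, and_false, if_true, if_false, ite_true, ite_false]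
  simp only [show ∀ a : Nat, (((a : Int)) + 0).toNat = a from by intro a; omega,
    show ∀ a : Nat, (((a : Int)) + 1).toNat = a + 1 from by intro a; omega,
    show ∀ a : Nat, ((((a + 1 : Nat) : Int)) + -1).toNat = a from by intro a; omega,
    show ∀ a : Nat, ((((a + 2 : Nat) : Int)) + -1).toNat = a + 1 from by intro a; omega,
    show ∀ a : Nat, ((((a + 1 : Nat) : Int)) + 0).toNat = a + 1 from by intro a; omega,
    show ∀ a : Nat, ((((a + 2 : Nat) : Int)) + 0).toNat = a + 2 from by intro a; omega,
    show ∀ a : Nat, ((((a + 1 : Nat) : Int)) + 1).toNat = a + 2 from by intro a; omega,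
    show ∀ a : Nat, a + 1 + 1 = a + 2 from fun a => rfl,
    Bool.true_and, Bool.and_true]
  apply Bool.eq_iff_iff.mpr
  simp only [Bool.and_eq_true, decide_eq_true_eq, abs_le]
  omega

theorem pv_prefix_aux (l : List Int) (acc : List Int) (s : Int) :
    (l.foldl (fun (st : List Int × Int) v => (st.1 ++ [st.2 + v], st.2 + v)) (acc, s)).1
      = acc ++ (List.range l.length).map (fun k => s + (l.take (k + 1)).sum) := by
  induction l generalizing acc s with
  | nil => simp
  | cons v t ih =>
    simp only [List.foldl_cons, ih, List.length_cons, List.range_succ_eq_map,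
      List.map_cons, List.map_map, List.take_succ_cons, List.sum_cons]
    simp [Function.comp, List.append_assoc, add_assoc]

theorem pv_prefix_getD (row : List Int) (k : Nat) (h : k ≤ row.length) :
    (pvPrefix row).getD k 0 = (row.take k).sum := by
  unfold pvPrefix
  rw [pv_prefix_aux]
  cases k with
  | zero => simp
  | succ k' =>
    have hk : k' < row.length := by omega
    rw [show ([(0:Int)] ++ (List.range row.length).map (fun k => 0 + (row.take (k+1)).sum))
          = (0:Int) :: (List.range row.length).map (fun k => 0 + (row.take (k+1)).sum) from rfl]
    rw [List.getD_cons_succ]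
    rw [pv_getD_map_range _ _ _ _ hk]
    simp

theorem pv_val_eq (image : List (List Int)) (threshold : Int) (i j : Nat)
    (hi : i + 2 < image.length) (hj : j + 2 < (image.getD 0 []).length)
    (hrect : ∀ row ∈ image, (image.getD 0 []).length ≤ row.length) :
    (List.range' i 3).foldl (fun v x =>
        (List.range' j 3).foldl (fun v y => v + pvCell image x y) v) 0 =
      pvLookI (image.map pvPrefix) i (j + 3) - pvLookI (image.map pvPrefix) i j
      + pvLookI (image.map pvPrefix) (i + 1) (j + 3) - pvLookI (image.map pvPrefix) (i + 1) j
      + pvLookI (image.map pvPrefix) (i + 2) (j + 3) - pvLookI (image.map pvPrefix) (i + 2) j := by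
  have hwin : ∀ x, x < image.length →
      pvLookI (image.map pvPrefix) x (j + 3) =
        pvLookI (image.map pvPrefix) x j
          + (pvCell image x j + pvCell image x (j + 1) + pvCell image x (j + 2)) := by
    intro x hx
    have hrowmem : image.getD x [] ∈ image := by
      rw [List.getD_eq_getElem _ _ hx]; exact List.getElem_mem _
    have hl : (image.getD 0 []).length ≤ (image.getD x []).length := hrect _ hrowmem
    have h3 : j + 3 ≤ (image.getD x []).length := by omega
    unfold pvLookI
    rw [pv_getD_map image pvPrefix x [] [] hx]
    rw [pv_prefix_getD _ _ h3, pv_prefix_getD _ _ (by omega : j ≤ (image.getD x []).length)]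
    have step : ∀ k, k < (image.getD x []).length →
        ((image.getD x []).take (k + 1)).sum
          = ((image.getD x []).take k).sum + (image.getD x []).getD k 0 := by
      intro k hk
      rw [List.sum_take_succ _ _ hk, List.getD_eq_getElem _ _ hk]
    have eA := step (j + 2) (by omega)
    have eB := step (j + 1) (by omega)
    rw [show j + 1 + 1 = j + 2 from rfl] at eB
    have eC := step j (by omega)
    rw [show j + 0 + 1 = j + 1 from rfl] at eC
    unfold pvCell
    rw [show j + 3 = j + 2 + 1 from rfl]
    omega
  rw [hwin i (by omega), hwin (i + 1) (by omega), hwin (i + 2) (by omega)]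
  have hr3 : ∀ a : Nat, List.range' a 3 = [a, a + 1, a + 2] := by
    intro a; simp [List.range']
  simp only [hr3, List.foldl_cons, List.foldl_nil]
  ring

-- ===== VERDICT (by name: the statement is the Claim_ definition above) =====
theorem resultGrid_spec : Claim_equal_resultGrid := by
  intro image threshold _hdom hpre
  unfold Spec_resultGrid resultGrid resultGrid_alt
  have hst :
      (List.range (image.length - 2)).foldl (fun st i =>
        (List.range ((image.getD 0 []).length - 2)).foldl (fun st j =>
          if pvIsValid image threshold i j then
            let val := (List.range' i 3).foldl (fun v x =>
                (List.range' j 3).foldl (fun v y => v + pvCell image x y) v) 0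
            let val := PySem.Int.floordiv val 9
            (List.range' i 3).foldl (fun st x =>
              (List.range' j 3).foldl (fun (st : List (List Int) × List (List Int)) y =>
                (st.1.modify x (fun row => row.modify y (· + val)),
                 st.2.modify x (fun row => row.modify y (· + 1)))) st) st
          else st) st)
        (List.replicate image.length (List.replicate ((image.getD 0 []).length) (0 : Int)),
         List.replicate image.length (List.replicate ((image.getD 0 []).length) (0 : Int)))
      =
      (List.range (image.length - 2)).foldl (fun st i =>
        (List.range ((image.getD 0 []).length - 2)).foldl (fun st j =>
          if pvValidB (pvEdgeH image threshold image.length ((image.getD 0 []).length))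
                      (pvEdgeV image threshold image.length ((image.getD 0 []).length)) i j then
            let val := PySem.Int.floordiv
              (pvLookI (image.map pvPrefix) i (j + 3) - pvLookI (image.map pvPrefix) i j
               + pvLookI (image.map pvPrefix) (i + 1) (j + 3) - pvLookI (image.map pvPrefix) (i + 1) j
               + pvLookI (image.map pvPrefix) (i + 2) (j + 3) - pvLookI (image.map pvPrefix) (i + 2) j) 9
            (List.range' i 3).foldl (fun st x =>
              (List.range' j 3).foldl (fun (st : List (List Int) × List (List Int)) y =>
                (st.1.modify x (fun row => row.modify y (· + val)),
                 st.2.modify x (fun row => row.modify y (· + 1)))) st) st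
          else st) st)
        (List.replicate image.length (List.replicate ((image.getD 0 []).length) (0 : Int)),
         List.replicate image.length (List.replicate ((image.getD 0 []).length) (0 : Int))) := by
    apply PySem.List.foldl_congr_mem
    intro st i hiMem
    apply PySem.List.foldl_congr_mem
    intro st j hjMem
    have hi : i + 2 < image.length := by
      have := List.mem_range.mp hiMem; omega
    have hj : j + 2 < (image.getD 0 []).length := by
      have := List.mem_range.mp hjMem; omega
    rw [pv_valid_eq image threshold i j hi hj,
      pv_val_eq image threshold i j hi hj hpre.2]
  exact congrArg (fun st : List (List Int) × List (List Int) =>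
    (List.range image.length).foldl (fun ans i =>
      (List.range ((image.getD 0 []).length)).foldl (fun ans j =>
        if pvCell st.2 i j = 0 then
          ans.modify i (fun row => row.set j (pvCell image i j))
        else
          ans.modify i (fun row => row.modify j (fun v => PySem.Int.floordiv v (pvCell st.2 i j)))) ans) st.1) hst
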